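-- pv_equiv track=rewrite | github.com/jko113/parsimonics | python/main.py | combine_two_rows
-- ===== SOURCE A (Python) =====
-- def combine_two_rows(top, bottom):
--     answer = []
--     row_width = len(top)
--
--     for i in range(0, row_width, 2):
--         top_left = top[i]
--         top_right = top[i + 1]
--         bottom_left = bottom[i]
--         bottom_right = bottom[i + 1]
--
--         curr_max = max(top_left, top_right, bottom_left, bottom_right)
--         answer.append(curr_max)
--     return answer
-- ===== SOURCE B (Python) =====
-- def combine_two_rows(top, bottom):
--     # pass 1: column-wise max of the two rows
--     col = [max(top[j], bottom[j]) for j in range(len(top))]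
--     # pass 2: pair adjacent column maxima
--     return [max(col[i], col[i + 1]) for i in range(0, len(top), 2)]
-- ===== Notes on version B (the rewrite author's own statement) =====
-- stated objective: alternative
-- what changed: Replaced the single fused 2x2-block scan (four indexed reads and a 4-way max per step) with a reduce-then-pair pipeline: one full-width pass building a column-wise max array, then a stride-2 pass pairing adjacent column maxima.
import Mathlib
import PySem

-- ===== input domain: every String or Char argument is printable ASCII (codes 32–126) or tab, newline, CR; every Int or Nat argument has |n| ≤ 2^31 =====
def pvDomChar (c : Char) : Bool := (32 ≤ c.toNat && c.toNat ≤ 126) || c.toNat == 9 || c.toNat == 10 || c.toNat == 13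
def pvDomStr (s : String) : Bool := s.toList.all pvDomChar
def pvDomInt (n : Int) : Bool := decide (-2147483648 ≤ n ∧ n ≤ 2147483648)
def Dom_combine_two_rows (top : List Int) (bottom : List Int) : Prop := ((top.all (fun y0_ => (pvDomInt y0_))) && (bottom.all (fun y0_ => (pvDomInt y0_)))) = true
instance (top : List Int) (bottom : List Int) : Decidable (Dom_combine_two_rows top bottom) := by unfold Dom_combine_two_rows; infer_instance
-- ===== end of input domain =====

-- B replaces A's fused 2x2-block scan by a column-max pass followed by a pairing pass
-- (alternative decomposition, same cost); return value only, no mutation involved.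

-- ===== PORT A =====
-- literal transliteration of A: for i in range(0, len(top), 2): answer.append(max of four reads)
def combine_two_rows (top : List Int) (bottom : List Int) : List Int :=
  (PySem.List.pyRange 0 (top.length : Int) 2).foldl
    (fun answer i =>
      let top_left := PySem.List.pyGetD top i 0
      let top_right := PySem.List.pyGetD top (i + 1) 0
      let bottom_left := PySem.List.pyGetD bottom i 0
      let bottom_right := PySem.List.pyGetD bottom (i + 1) 0
      answer ++ [max (max (max top_left top_right) bottom_left) bottom_right]) []

-- ===== PORT B =====
-- literal transliteration of B: col = [max(top[j],bottom[j]) for j in range(len(top))];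
-- then [max(col[i], col[i+1]) for i in range(0, len(top), 2)]
def combine_two_rows_alt (top : List Int) (bottom : List Int) : List Int :=
  let col := (PySem.List.pyRange 0 (top.length : Int) 1).map
    (fun j => max (PySem.List.pyGetD top j 0) (PySem.List.pyGetD bottom j 0))
  (PySem.List.pyRange 0 (top.length : Int) 2).map
    (fun i => max (PySem.List.pyGetD col i 0) (PySem.List.pyGetD col (i + 1) 0))

-- ===== PRECONDITION & SPEC =====
-- Pre_ excludes exactly the inputs where Python A raises IndexError:
-- odd len(top) (top[i+1] past the end) or bottom shorter than top.
def Pre_combine_two_rows (top : List Int) (bottom : List Int) : Prop :=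
  top.length % 2 = 0 ∧ top.length ≤ bottom.length
instance (top : List Int) (bottom : List Int) : Decidable (Pre_combine_two_rows top bottom) := by
  unfold Pre_combine_two_rows; infer_instance

def pvWitness_combine_two_rows : List Int × List Int := ([3, 1, 4, 1], [5, 9, 2, 6])

def Spec_combine_two_rows (top : List Int) (bottom : List Int) (out : List Int) : Prop := out = combine_two_rows_alt top bottom
instance (top : List Int) (bottom : List Int) (out : List Int) : Decidable (Spec_combine_two_rows top bottom out) := by unfold Spec_combine_two_rows; infer_instance

-- ===== CLAIM (what is proved, stated in full; the proofs are below) =====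
def Claim_equal_combine_two_rows : Prop := ∀ (top : List Int) (bottom : List Int), Dom_combine_two_rows top bottom → Pre_combine_two_rows top bottom → Spec_combine_two_rows top bottom (combine_two_rows top bottom)

-- ===== LEMMAS AND PROOFS =====

-- ===== VERDICT (by name: the statement is the Claim_ definition above) =====
theorem combine_two_rows_spec : Claim_equal_combine_two_rows := by
  intro top bottom _ hpre
  obtain ⟨heven, hle⟩ := hpre
  unfold Spec_combine_two_rows combine_two_rows combine_two_rows_alt
  rw [PySem.List.foldl_append_singleton_eq_map, List.nil_append]
  apply List.map_congr_left
  intro i hi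
  rw [PySem.List.mem_pyRange_iff_of_pos (by norm_num)] at hi
  obtain ⟨hi0, hin, hdvd⟩ := hi
  have hi1 : i + 1 < (top.length : Int) := by
    rcases hdvd with ⟨k, hk⟩
    omega
  rw [PySem.List.pyGetD_map_pyRange_of_nonneg _ _ _ _ hi0 (by omega),
      PySem.List.pyGetD_map_pyRange_of_nonneg _ _ _ _ (by omega) hi1]
  -- the four reads are the same values; rearrange the max nesting
  rw [max_assoc, max_max_max_comm]
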